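-- pv_equiv track=rewrite | github.com/mirrornight/pytools | common/utils.py | get_element_from_dict
-- ===== SOURCE A (Python) =====
-- def _ring_generator(size, max_step):
--     _ = list(range(size))
--     i = 0
--     for s in range(max_step):
--         yield _[i]
--         i = 0 if i + 1 == size else i + 1
--
-- def get_element_from_dict(target_dict, num):
--     """
--     {
--         "a": [1, 4, 7],
--         "b": [2, 5],
--         "c": [3, 6]
--     }
--     get 4
--     [1, 2, 3, 4]
--     :param target_dict:
--     :param num: element number
--     :return:
--     """
--     two_dimensional_arr = []
--     v_len_list = []
--     for v in target_dict.values():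
--         if v:
--             two_dimensional_arr.append(v)
--             v_len_list.append(len(v))
--
--     arr_len = len(v_len_list)
--     element_total_count = sum(v_len_list)
--     result = []
--     index_record = [0 for _ in range(arr_len)]
--     max_step = arr_len * max(v_len_list) if v_len_list else 0
--     rg = _ring_generator(arr_len, max_step)
--     if not two_dimensional_arr:
--         return result
--     for i in range(num):
--         index = next(rg)
--         while index_record[index] >= v_len_list[index]:
--             index = next(rg)
--         result.append(two_dimensional_arr[index][index_record[index]])
--         index_record[index] += 1
--         if element_total_count <= i + 1:
--             break
--     return result
-- ===== SOURCE B (Python) =====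
-- def get_element_from_dict(target_dict, num):
--     active = [v for v in target_dict.values() if v]
--     total = sum(len(v) for v in active)
--     limit = min(num, total)
--     maxlen = max((len(v) for v in active), default=0)
--     result = []
--     for col in range(maxlen):
--         if len(result) >= limit:
--             break
--         for v in active:
--             if len(result) < limit:
--                 result.append(v[col])
--         active = [v for v in active if len(v) > col + 1]
--     return result
-- ===== Notes on version B (the rewrite author's own statement) =====
-- stated objective: alternative
-- what changed: Instead of simulating a ring generator over list indices with a per-element skip-scan past exhausted lists, B walks columns directly, appending the col-th element of each still-long-enough list and dropping exhausted lists from the active set after each column, stopping at min(num, total).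
import Mathlib
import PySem

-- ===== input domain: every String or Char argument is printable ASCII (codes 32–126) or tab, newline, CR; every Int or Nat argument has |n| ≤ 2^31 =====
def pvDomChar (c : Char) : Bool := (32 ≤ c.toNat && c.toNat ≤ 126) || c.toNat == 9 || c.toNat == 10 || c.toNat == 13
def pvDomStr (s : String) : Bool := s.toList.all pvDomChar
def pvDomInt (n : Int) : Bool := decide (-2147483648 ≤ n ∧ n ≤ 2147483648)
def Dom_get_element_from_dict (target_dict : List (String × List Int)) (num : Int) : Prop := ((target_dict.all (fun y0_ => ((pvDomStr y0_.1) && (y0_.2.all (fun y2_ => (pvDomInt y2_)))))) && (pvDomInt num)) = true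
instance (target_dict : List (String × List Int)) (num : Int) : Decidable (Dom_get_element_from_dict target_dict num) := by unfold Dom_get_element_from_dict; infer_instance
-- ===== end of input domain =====

-- B replaces A's ring-generator simulation (index ring with a per-element skip-scan past
-- exhausted lists) by a direct column-wise walk that drops exhausted lists after each column;
-- same return value (objective: alternative).

-- ===== PORT A =====

-- the list of values yielded by _ring_generator(size, max_step): i cycles 0,1,…,size-1,0,…
def geRing (size : Nat) : Nat → Nat → List Nat
  | 0, _ => []
  | steps+1, i => i :: geRing size steps (if i + 1 = size then 0 else i + 1)

-- 'index = next(rg); while index_record[index] >= v_len_list[index]: index = next(rg)':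
-- consume ring entries until a non-exhausted index is found; returns the element, the remaining
-- ring and the updated index_record (none = StopIteration, unreachable from A's initial state).
def geScan (arrs : List (List Int)) (lens : List Int) : List Nat → List Int → Option (Int × List Nat × List Int)
  | [], _ => none
  | c :: ring, rec =>
    if lens.getD c 0 ≤ rec.getD c 0 then geScan arrs lens ring rec
    else some ((arrs.getD c []).getD (rec.getD c 0).toNat 0, ring, rec.set c (rec.getD c 0 + 1))

-- 'for i in range(num): … if element_total_count <= i + 1: break'
def geLoop (arrs : List (List Int)) (lens : List Int) (total : Int) : Nat → Nat → List Nat → List Int → List Int → List Int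
  | 0, _, _, _, acc => acc
  | k+1, i, ring, rec, acc =>
    match geScan arrs lens ring rec with
    | none => acc
    | some (v, ring', rec') =>
      if total ≤ (i : Int) + 1 then acc ++ [v]
      else geLoop arrs lens total k (i+1) ring' rec' (acc ++ [v])

def get_element_from_dict (target_dict : List (String × List Int)) (num : Int) : List Int :=
  let vals := (PySem.Dict.ofList target_dict).values
  let p := vals.foldl (fun (p : List (List Int) × List Int) v =>
      if !v.isEmpty then (p.1 ++ [v], p.2 ++ [(v.length : Int)]) else p) ([], [])
  let two_dimensional_arr := p.1
  let v_len_list := p.2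
  let arr_len := v_len_list.length
  let element_total_count := v_len_list.sum
  let index_record : List Int := (List.range arr_len).map (fun _ => (0 : Int))
  let max_step : Int := if !v_len_list.isEmpty then (arr_len : Int) * ((PySem.List.max? v_len_list (fun x => x)).getD 0) else 0
  let ring := geRing arr_len max_step.toNat 0
  if two_dimensional_arr.isEmpty then []
  else geLoop two_dimensional_arr v_len_list element_total_count num.toNat 0 ring index_record []

-- ===== PORT B =====

-- 'for v in active: if len(result) < limit: result.append(v[col])'
def gePass (limit : Int) (col : Nat) (active : List (List Int)) (result : List Int) : List Int :=
  active.foldl (fun r v => if (r.length : Int) < limit then r ++ [v.getD col 0] else r) result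

-- 'for col in range(maxlen): if len(result) >= limit: break; …; active = [v for v in active if len(v) > col+1]'
def geColLoop (limit : Int) : Nat → Nat → List (List Int) → List Int → List Int
  | 0, _, _, result => result
  | fuel+1, col, active, result =>
    if limit ≤ (result.length : Int) then result
    else geColLoop limit fuel (col+1) (active.filter (fun v => decide (col + 1 < v.length))) (gePass limit col active result)

def get_element_from_dict_alt (target_dict : List (String × List Int)) (num : Int) : List Int :=
  let active := ((PySem.Dict.ofList target_dict).values).filter (fun v => !v.isEmpty)
  let total : Int := (active.map (fun v => (v.length : Int))).sum
  let limit := min num total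
  let maxlen := ((PySem.List.max? (active.map (fun v => (v.length : Int))) (fun x => x)).getD 0).toNat
  geColLoop limit maxlen 0 active []

-- ===== PRECONDITION & SPEC =====
def Spec_get_element_from_dict (target_dict : List (String × List Int)) (num : Int) (out : List Int) : Prop := out = get_element_from_dict_alt target_dict num
instance (target_dict : List (String × List Int)) (num : Int) (out : List Int) : Decidable (Spec_get_element_from_dict target_dict num out) := by unfold Spec_get_element_from_dict; infer_instance

-- ===== CLAIM (what is proved, stated in full; the proofs are below) =====
def Claim_equal_get_element_from_dict : Prop := ∀ (target_dict : List (String × List Int)) (num : Int), Dom_get_element_from_dict target_dict num → Spec_get_element_from_dict target_dict num (get_element_from_dict target_dict num)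

-- ===== LEMMAS AND PROOFS =====

theorem geScan_some_length (arrs : List (List Int)) (lens : List Int) (ring : List Nat) (rec : List Int)
    (v : Int) (r' : List Nat) (rec' : List Int)
    (h : geScan arrs lens ring rec = some (v, r', rec')) : r'.length < ring.length := by
  induction ring generalizing rec with
  | nil => simp [geScan] at h
  | cons c ring ih =>
    simp only [geScan] at h
    split at h
    · exact Nat.lt_succ_of_lt (ih rec h)
    · simp only [Option.some.injEq, Prod.mk.injEq] at h
      obtain ⟨-, h2, -⟩ := h
      simp [← h2]

def geEmit (arrs : List (List Int)) (lens : List Int) (ring : List Nat) (rec : List Int) : List Int :=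
  match h : geScan arrs lens ring rec with
  | none => []
  | some (v, r', rec') => v :: geEmit arrs lens r' rec'
termination_by ring.length
decreasing_by exact geScan_some_length arrs lens ring rec _ _ _ h
theorem geEmit_eq (arrs : List (List Int)) (lens : List Int) (ring : List Nat) (rec : List Int) :
    geEmit arrs lens ring rec = match geScan arrs lens ring rec with
      | none => []
      | some (v, r', rec') => v :: geEmit arrs lens r' rec' := by
  rw [geEmit]
  rcases hS : geScan arrs lens ring rec with - | ⟨v, r', rec'⟩ <;> simp [hS]

theorem geEmit_nil (arrs : List (List Int)) (lens : List Int) (rec : List Int) :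
    geEmit arrs lens [] rec = [] := by
  rw [geEmit_eq]; simp [geScan]
theorem geEmit_skip (arrs : List (List Int)) (lens : List Int) (c : Nat) (ring : List Nat) (rec : List Int)
    (h : lens.getD c 0 ≤ rec.getD c 0) :
    geEmit arrs lens (c :: ring) rec = geEmit arrs lens ring rec := by
  have hs : geScan arrs lens (c :: ring) rec = geScan arrs lens ring rec := by
    simp only [geScan]; rw [if_pos h]
  rw [geEmit_eq, hs, ← geEmit_eq]
theorem geEmit_emit (arrs : List (List Int)) (lens : List Int) (c : Nat) (ring : List Nat) (rec : List Int)
    (h : rec.getD c 0 < lens.getD c 0) :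
    geEmit arrs lens (c :: ring) rec
      = (arrs.getD c []).getD (rec.getD c 0).toNat 0 :: geEmit arrs lens ring (rec.set c (rec.getD c 0 + 1)) := by
  have hs : geScan arrs lens (c :: ring) rec
      = some ((arrs.getD c []).getD (rec.getD c 0).toNat 0, ring, rec.set c (rec.getD c 0 + 1)) := by
    simp only [geScan]; rw [if_neg (not_le.mpr h)]
  rw [geEmit_eq, hs]

def lensOf (arrs : List (List Int)) : List Int := arrs.map (fun v => (v.length : Int))

def colElems (arrs : List (List Int)) (j : Nat) : List Int :=
  (arrs.filter (fun v => decide (j < v.length))).map (fun v => v.getD j 0)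

def colsFrom (arrs : List (List Int)) : Nat → Nat → List Int
  | _, 0 => []
  | j, m+1 => colElems arrs j ++ colsFrom arrs (j+1) m

def ringTail : Nat → Nat → List Nat
  | 0, _ => []
  | d+1, i => i :: ringTail d (i+1)

def blocksRec (n : Nat) : Nat → List Nat
  | 0 => []
  | m+1 => ringTail n 0 ++ blocksRec n m

def recAt2 (arrs : List (List Int)) (j c : Nat) : List Int :=
  arrs.mapIdx (fun idx v => if idx < c then min ((j:Int)+1) (v.length:Int) else min (j:Int) (v.length:Int))

theorem recAt2_getD (arrs : List (List Int)) (j c c' : Nat) (hc : c' < arrs.length) :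
    (recAt2 arrs j c).getD c' 0
      = if c' < c then min ((j:Int)+1) (arrs[c'].length:Int) else min (j:Int) (arrs[c'].length:Int) := by
  simp [recAt2, List.getD_eq_getElem?_getD, List.getElem?_mapIdx, List.getElem?_eq_getElem hc]

theorem lensOf_getD (arrs : List (List Int)) (c : Nat) (hc : c < arrs.length) :
    (lensOf arrs).getD c 0 = (arrs[c].length : Int) := by
  simp [lensOf, List.getD_eq_getElem?_getD, List.getElem?_map, List.getElem?_eq_getElem hc]

theorem arrs_getD (arrs : List (List Int)) (c : Nat) (hc : c < arrs.length) :
    arrs.getD c [] = arrs[c] := by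
  simp [List.getD_eq_getElem?_getD, List.getElem?_eq_getElem hc]

theorem colElems_cons (v : List Int) (arrs : List (List Int)) (j : Nat) :
    colElems (v :: arrs) j = (if j < v.length then [v.getD j 0] else []) ++ colElems arrs j := by
  by_cases h : j < v.length
  · simp [colElems, List.filter_cons, h]
  · simp [colElems, List.filter_cons, h]

theorem recAt2_succ_exhausted (arrs : List (List Int)) (j c : Nat) (hc : c < arrs.length)
    (h : (arrs[c].length : Int) ≤ (j:Int)) : recAt2 arrs j (c+1) = recAt2 arrs j c := by
  apply List.ext_getElem (by simp [recAt2])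
  intro i h1 h2
  simp only [recAt2, List.getElem_mapIdx]
  by_cases hic : i = c
  · subst hic; split_ifs <;> omega
  · split_ifs <;> omega

theorem recAt2_set_emit (arrs : List (List Int)) (j c : Nat) (hc : c < arrs.length)
    (h : (j:Int) < (arrs[c].length : Int)) :
    (recAt2 arrs j c).set c ((j:Int)+1) = recAt2 arrs j (c+1) := by
  apply List.ext_getElem (by simp [recAt2])
  intro i h1 h2
  simp only [List.getElem_set, recAt2, List.getElem_mapIdx]
  by_cases hic : i = c
  · subst hic; rw [if_pos rfl]; split_ifs <;> omega
  · rw [if_neg (by omega)]; split_ifs <;> omega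

theorem recAt2_wrap (arrs : List (List Int)) (j : Nat) :
    recAt2 arrs j arrs.length = recAt2 arrs (j+1) 0 := by
  apply List.ext_getElem (by simp [recAt2])
  intro i h1 h2
  simp only [recAt2, List.getElem_mapIdx]
  have h3 : i < arrs.length := by simpa [recAt2] using h1
  rw [if_pos h3, if_neg (by omega)]
  push_cast
  ring_nf

theorem pass_lemma (arrs : List (List Int)) (j : Nat) :
    ∀ d c, c + d = arrs.length → ∀ RING : List Nat,
      geEmit arrs (lensOf arrs) (ringTail d c ++ RING) (recAt2 arrs j c)
        = colElems (arrs.drop c) j ++ geEmit arrs (lensOf arrs) RING (recAt2 arrs j arrs.length) := by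
  intro d
  induction d with
  | zero =>
    intro c hc RING
    have : c = arrs.length := by omega
    subst this
    simp [ringTail, colElems]
  | succ d ih =>
    intro c hc RING
    have hclt : c < arrs.length := by omega
    have hdrop : arrs.drop c = arrs[c] :: arrs.drop (c+1) := List.drop_eq_getElem_cons hclt
    by_cases hj : (j:Int) < (arrs[c].length : Int)
    · -- emit
      have hrec : (recAt2 arrs j c).getD c 0 = (j:Int) := by
        rw [recAt2_getD arrs j c c hclt, if_neg (by omega)]
        omega
      have hlt : (recAt2 arrs j c).getD c 0 < (lensOf arrs).getD c 0 := by
        rw [hrec, lensOf_getD arrs c hclt]; exact hj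
      rw [show ringTail (d+1) c = c :: ringTail d (c+1) from rfl, List.cons_append,
          geEmit_emit arrs (lensOf arrs) c _ _ hlt, hrec, recAt2_set_emit arrs j c hclt hj,
          ih (c+1) (by omega) RING, hdrop, colElems_cons,
          if_pos (show j < arrs[c].length by omega), arrs_getD arrs c hclt]
      simp
    · -- skip
      have hge : (lensOf arrs).getD c 0 ≤ (recAt2 arrs j c).getD c 0 := by
        rw [recAt2_getD arrs j c c hclt, if_neg (by omega), lensOf_getD arrs c hclt]
        omega
      rw [show ringTail (d+1) c = c :: ringTail d (c+1) from rfl, List.cons_append,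
          geEmit_skip arrs (lensOf arrs) c _ _ hge,
          ← recAt2_succ_exhausted arrs j c hclt (by omega),
          ih (c+1) (by omega) RING, hdrop, colElems_cons,
          if_neg (show ¬ j < arrs[c].length by omega)]
      simp

theorem full_lemma (arrs : List (List Int)) :
    ∀ m j, geEmit arrs (lensOf arrs) (blocksRec arrs.length m) (recAt2 arrs j 0) = colsFrom arrs j m := by
  intro m
  induction m with
  | zero => intro j; simp [blocksRec, colsFrom, geEmit_nil]
  | succ m ih =>
    intro j
    rw [show blocksRec arrs.length (m+1) = ringTail arrs.length 0 ++ blocksRec arrs.length m from rfl,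
        pass_lemma arrs j arrs.length 0 (by omega), recAt2_wrap, ih (j+1)]
    simp [colsFrom]

theorem geRing_ringTail (n : Nat) :
    ∀ d i steps, i + d + 1 = n → geRing n ((d+1) + steps) i = ringTail (d+1) i ++ geRing n steps 0 := by
  intro d
  induction d with
  | zero =>
    intro i steps h
    rw [show 0 + 1 + steps = steps + 1 from by omega]
    simp only [geRing, ringTail]
    rw [if_pos (by omega)]
    simp
  | succ d ih =>
    intro i steps h
    rw [show (d + 1) + 1 + steps = ((d + 1) + steps) + 1 from by omega]
    simp only [geRing, ringTail]
    rw [if_neg (by omega), ih (i+1) steps (by omega)]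
    simp [ringTail]

theorem geRing_blocks (n : Nat) (hn : 1 ≤ n) :
    ∀ m, geRing n (m * n) 0 = blocksRec n m := by
  intro m
  induction m with
  | zero => simp [geRing, blocksRec]
  | succ m ih =>
    have h1 : (m + 1) * n = ((n - 1) + 1) + m * n := by
      have : (m + 1) * n = n + m * n := by ring
      omega
    rw [h1, geRing_ringTail n (n-1) 0 (m * n) (by omega), ih]
    rw [show (n - 1) + 1 = n from by omega]
    rfl

theorem sum_map_add (l : List (List Int)) (f g : List Int → Nat) :
    (l.map (fun v => f v + g v)).sum = (l.map f).sum + (l.map g).sum := by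
  induction l with
  | nil => simp
  | cons v t ih => simp [ih]; omega

theorem length_colElems (arrs : List (List Int)) (j : Nat) :
    (colElems arrs j).length = (arrs.map (fun v => if j < v.length then 1 else 0)).sum := by
  induction arrs with
  | nil => simp [colElems]
  | cons v t ih =>
    rw [colElems_cons]
    by_cases h : j < v.length <;> simp [h, ih] <;> omega

theorem length_colsFrom (arrs : List (List Int)) :
    ∀ m j, (colsFrom arrs j m).length = (arrs.map (fun v => min m (v.length - j))).sum := by
  intro m
  induction m with
  | zero =>
    intro j
    simp [colsFrom]
  | succ m ih =>
    intro j
    rw [show colsFrom arrs j (m+1) = colElems arrs j ++ colsFrom arrs (j+1) m from rfl]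
    rw [List.length_append, length_colElems, ih (j+1)]
    rw [← sum_map_add arrs (fun v => if j < v.length then 1 else 0) (fun v => min m (v.length - (j+1)))]
    apply congrArg
    apply List.map_congr_left
    intro v _
    by_cases h : j < v.length <;> simp [h] <;> omega

theorem geLoop_take (arrs : List (List Int)) (lens : List Int) (total : Int) :
    ∀ (k i : Nat) (ring : List Nat) (rec acc : List Int), (i:Int) + (geEmit arrs lens ring rec).length = total →
      geLoop arrs lens total k i ring rec acc = acc ++ (geEmit arrs lens ring rec).take k := by
  intro k
  induction k with
  | zero => intro i ring rec acc _; simp [geLoop]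
  | succ k ih =>
    intro i ring rec acc hlen
    rw [show geLoop arrs lens total (k+1) i ring rec acc
        = (match geScan arrs lens ring rec with
           | none => acc
           | some (v, ring', rec') =>
             if total ≤ (i : Int) + 1 then acc ++ [v]
             else geLoop arrs lens total k (i+1) ring' rec' (acc ++ [v])) from rfl]
    rcases hS : geScan arrs lens ring rec with - | ⟨v, r', rc'⟩
    · have hE : geEmit arrs lens ring rec = [] := by rw [geEmit_eq, hS]
      rw [hE]; simp
    · have hE : geEmit arrs lens ring rec = v :: geEmit arrs lens r' rc' := by
        rw [geEmit_eq, hS]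
      rw [hE] at hlen ⊢
      dsimp only
      by_cases hbr : total ≤ (i:Int) + 1
      · rw [if_pos hbr]
        have h0 : (geEmit arrs lens r' rc').length = 0 := by
          simp only [List.length_cons] at hlen; omega
        rw [List.eq_nil_of_length_eq_zero h0]
        simp
      · rw [if_neg hbr, ih (i+1) r' rc' (acc ++ [v]) (by simp at hlen ⊢; omega)]
        simp

theorem gePass_eq (limit : Int) (col : Nat) :
    ∀ (active : List (List Int)) (r : List Int),
      gePass limit col active r = r ++ ((active.map (fun v => v.getD col 0)).take (limit.toNat - r.length)) := by
  intro active
  induction active with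
  | nil => intro r; simp [gePass]
  | cons v t ih =>
    intro r
    rw [show gePass limit col (v :: t) r
        = gePass limit col t (if (r.length : Int) < limit then r ++ [v.getD col 0] else r) from rfl]
    by_cases hlt : (r.length : Int) < limit
    · rw [if_pos hlt, ih]
      have h1 : limit.toNat - r.length = (limit.toNat - (r.length + 1)) + 1 := by omega
      rw [List.map_cons, h1, List.take_succ_cons]
      simp
    · rw [if_neg hlt, ih]
      have h0 : limit.toNat - r.length = 0 := by omega
      rw [h0]
      simp

theorem colsFrom_add (arrs : List (List Int)) :
    ∀ a j b, colsFrom arrs j (a + b) = colsFrom arrs j a ++ colsFrom arrs (j + a) b := by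
  intro a
  induction a with
  | zero => intro j b; simp [colsFrom]
  | succ a ih =>
    intro j b
    rw [show a + 1 + b = (a + b) + 1 from by omega]
    rw [show colsFrom arrs j ((a+b)+1) = colElems arrs j ++ colsFrom arrs (j+1) (a+b) from rfl,
        ih (j+1) b,
        show colsFrom arrs j (a+1) = colElems arrs j ++ colsFrom arrs (j+1) a from rfl]
    simp [show j + 1 + a = j + (a+1) from by omega]

theorem geColLoop_take (arrs : List (List Int)) (limit : Int) (maxlen : Nat) :
    ∀ fuel col r, col + fuel = maxlen → r = (colsFrom arrs 0 col).take limit.toNat →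
      geColLoop limit fuel col (arrs.filter (fun v => decide (col < v.length))) r
        = (colsFrom arrs 0 maxlen).take limit.toNat := by
  intro fuel
  induction fuel with
  | zero =>
    intro col r hcol hr
    have : col = maxlen := by omega
    subst this
    exact hr
  | succ fuel ih =>
    intro col r hcol hr
    rw [show geColLoop limit (fuel+1) col (arrs.filter (fun v => decide (col < v.length))) r
        = (if limit ≤ (r.length : Int) then r
           else geColLoop limit fuel (col+1)
             ((arrs.filter (fun v => decide (col < v.length))).filter (fun v => decide (col + 1 < v.length)))
             (gePass limit col (arrs.filter (fun v => decide (col < v.length))) r)) from rfl]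
    have hsplit : colsFrom arrs 0 maxlen = colsFrom arrs 0 col ++ colsFrom arrs col (fuel+1) := by
      rw [← hcol, colsFrom_add arrs col 0 (fuel+1)]
      simp
    by_cases hle : limit ≤ (r.length : Int)
    · rw [if_pos hle, hsplit]
      by_cases hl0 : limit ≤ 0
      · have : limit.toNat = 0 := by omega
        rw [hr, this]; simp
      · have h1 : limit.toNat ≤ r.length := by omega
        have h2 : limit.toNat ≤ (colsFrom arrs 0 col).length := by
          rw [hr] at h1; simp at h1; omega
        rw [hr, List.take_append_of_le_length h2]
    · rw [if_neg hle]
      have hff : ((arrs.filter (fun v => decide (col < v.length))).filter (fun v => decide (col + 1 < v.length)))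
          = arrs.filter (fun v => decide (col + 1 < v.length)) := by
        rw [List.filter_filter]
        apply List.filter_congr
        intro v _
        by_cases h : col + 1 < v.length
        · simp [h]; omega
        · simp [h]
      have hpass : gePass limit col (arrs.filter (fun v => decide (col < v.length))) r
          = (colsFrom arrs 0 (col+1)).take limit.toNat := by
        rw [gePass_eq]
        have hmapeq : (arrs.filter (fun v => decide (col < v.length))).map (fun v => v.getD col 0)
            = colElems arrs col := rfl
        rw [hmapeq, hr]
        have h3 : limit.toNat - ((colsFrom arrs 0 col).take limit.toNat).length
            = limit.toNat - (colsFrom arrs 0 col).length := by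
          simp; omega
        rw [h3, ← List.take_append,
            show colsFrom arrs 0 (col+1) = colsFrom arrs 0 col ++ colElems arrs col from by
              rw [colsFrom_add arrs col 0 1]; simp [colsFrom]]
      rw [hff, hpass, ih (col+1) _ (by omega) rfl]

theorem foldl_pair (vs : List (List Int)) : ∀ (A : List (List Int)) (B : List Int),
    vs.foldl (fun (p : List (List Int) × List Int) v =>
        if !v.isEmpty then (p.1 ++ [v], p.2 ++ [(v.length : Int)]) else p) (A, B)
      = (A ++ vs.filter (fun v => !v.isEmpty),
         B ++ (vs.filter (fun v => !v.isEmpty)).map (fun v => (v.length : Int))) := by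
  induction vs with
  | nil => intro A B; simp
  | cons v t ih =>
    intro A B
    rw [List.foldl_cons]
    by_cases hv : v.isEmpty
    · rw [if_neg (by simp [hv]), ih, List.filter_cons]
      simp [hv]
    · rw [if_pos (by simp [hv]), ih, List.filter_cons]
      simp [hv, List.append_assoc]

theorem rec0_eq (arrs : List (List Int)) :
    (List.range arrs.length).map (fun _ => (0 : Int)) = recAt2 arrs 0 0 := by
  apply List.ext_getElem (by simp [recAt2])
  intro i h1 h2
  simp [recAt2, List.getElem_mapIdx]

theorem sum_lensOf (arrs : List (List Int)) :
    (lensOf arrs).sum = ((arrs.map List.length).sum : Int) := by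
  induction arrs with
  | nil => simp [lensOf]
  | cons v t ih => simp [lensOf] at ih ⊢; omega

theorem length_colsFull (arrs : List (List Int)) (maxlen : Nat)
    (hmax : ∀ v ∈ arrs, v.length ≤ maxlen) :
    (colsFrom arrs 0 maxlen).length = (arrs.map List.length).sum := by
  rw [length_colsFrom]
  apply congrArg
  apply List.map_congr_left
  intro v hv
  have := hmax v hv
  omega

theorem take_min_length (S : List Int) (a : Nat) : S.take (min a S.length) = S.take a := by
  rw [← List.take_take, List.take_length]

theorem main_equiv (target_dict : List (String × List Int)) (num : Int) :
    get_element_from_dict target_dict num = get_element_from_dict_alt target_dict num := by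
  unfold get_element_from_dict get_element_from_dict_alt
  dsimp only
  rw [foldl_pair]
  simp only [List.nil_append]
  set vals := (PySem.Dict.ofList target_dict).values with hvals
  set arrs := vals.filter (fun v => !v.isEmpty) with harrs
  by_cases hA : arrs = []
  · rw [hA]
    simp [geColLoop, PySem.List.max?]
  · rw [if_neg (by simp [hA])]
    -- shared quantities
    have hfe : ∀ v ∈ arrs, !v.isEmpty := by
      intro v hv
      exact (List.mem_filter.mp hv).2
    set lens := List.map (fun v => ((v.length : Nat) : Int)) arrs with hlensdef
    have hlensOf : lens = lensOf arrs := rfl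
    have hlensne : lens ≠ [] := by
      simp [hlensOf, lensOf, hA]
    -- max? facts
    obtain ⟨m, hm⟩ : ∃ m, PySem.List.max? lens (fun x => x) = some m := by
      rcases hmo : PySem.List.max? lens (fun x => x) with - | m
      · exact absurd ((PySem.List.max?_eq_none_iff _ _).mp hmo) hlensne
      · exact ⟨m, rfl⟩
    have hm0 : 0 ≤ m := by
      have hmem := PySem.List.max?_mem hm
      rw [hlensOf, lensOf] at hmem
      obtain ⟨v, -, hv⟩ := List.mem_map.mp hmem
      omega
    set maxlen := m.toNat with hmaxlen
    have hmax : ∀ v ∈ arrs, v.length ≤ maxlen := by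
      intro v hv
      have := PySem.List.max?_isMax hm ((v.length : Int)) (by
        rw [hlensOf, lensOf]; exact List.mem_map.mpr ⟨v, hv, rfl⟩)
      omega
    set n := arrs.length with hn
    have hn1 : 1 ≤ n := by
      rw [hn]
      have : arrs.length ≠ 0 := fun h0 => hA (List.eq_nil_of_length_eq_zero h0)
      omega
    have hlenlen : lens.length = n := by simp [hlensOf, lensOf, hn]
    -- total
    set total := lens.sum with htotal
    have htotalN : total = ((arrs.map List.length).sum : Int) := by rw [htotal, hlensOf]; exact sum_lensOf arrs
    -- step count
    have hstep : ((lens.length : Int) * ((PySem.List.max? lens (fun x => x)).getD 0)).toNat = n * maxlen := by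
      rw [hm, hlenlen]
      simp only [Option.getD_some]
      rw [show m = (maxlen : Int) by omega]
      rw [show ((n : Int) * (maxlen : Int)) = ((maxlen * n : Nat) : Int) by push_cast; ring]
      rw [Int.toNat_natCast]
      ring
    -- the emitted stream
    set S := colsFrom arrs 0 maxlen with hSdef
    have hSlen : S.length = (arrs.map List.length).sum := length_colsFull arrs maxlen hmax
    -- A side
    have hringeq : geRing lens.length (if !lens.isEmpty then ((lens.length : Int) * ((PySem.List.max? lens (fun x => x)).getD 0)) else 0).toNat 0
        = blocksRec n maxlen := by
      rw [if_pos (by simp [hlensne]), hstep]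
      rw [show n * maxlen = maxlen * n from by ring, hlenlen]
      exact geRing_blocks n hn1 maxlen
    have hemit : geEmit arrs lens (blocksRec n maxlen) (recAt2 arrs 0 0) = S := by
      rw [hlensOf, hSdef]
      exact full_lemma arrs maxlen 0
    have hA' : geLoop arrs lens total num.toNat 0
        (geRing lens.length (if !lens.isEmpty then ((lens.length : Int) * ((PySem.List.max? lens (fun x => x)).getD 0)) else 0).toNat 0)
        ((List.range lens.length).map (fun _ => (0 : Int))) []
        = S.take num.toNat := by
      rw [hringeq, hlenlen, rec0_eq arrs,
          geLoop_take arrs lens total num.toNat 0 _ _ [] (by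
            rw [hemit]; rw [hSlen]; rw [htotalN]; simp),
          hemit]
      simp
    -- B side
    have hfilter0 : arrs.filter (fun v => decide (0 < v.length)) = arrs := by
      apply List.filter_eq_self.mpr
      intro v hv
      have := hfe v hv
      simp at this ⊢
      exact List.length_pos_iff.mpr this
    have hB : geColLoop (min num total) maxlen 0 arrs []
        = S.take (min num total).toNat := by
      conv_lhs => rw [← hfilter0]
      exact geColLoop_take arrs (min num total) maxlen maxlen 0 [] (by omega) (by simp [colsFrom])
    -- combine
    have htm : (min num total).toNat = min num.toNat total.toNat := by
      rcases le_total num total with h | h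
      · rw [min_eq_left h, min_eq_left (by omega : num.toNat ≤ total.toNat)]
      · rw [min_eq_right h, min_eq_right (by omega : total.toNat ≤ num.toNat)]
    have hlen2 : S.length = total.toNat := by
      rw [hSlen, htotalN, Int.toNat_natCast]
    have htake : S.take num.toNat = S.take (min num total).toNat := by
      rw [htm, ← hlen2, take_min_length]
    rw [hA', hm]
    simp only [Option.getD_some]
    rw [← hmaxlen, hB]
    exact htake

-- ===== VERDICT (by name: the statement is the Claim_ definition above) =====
theorem get_element_from_dict_spec : Claim_equal_get_element_from_dict := by
  intro target_dict num _
  unfold Spec_get_element_from_dict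
  exact main_equiv target_dict num
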